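-- pv_equiv track=rewrite | github.com/juanmarco1999/bioma-system2 | migrate_routes.py | extract_route_function
-- ===== SOURCE A (Python) =====
-- def extract_route_function(lines, start_idx):
--     """Extrai função completa de uma rota"""
--     function_lines = []
--     indent_level = None
--     in_function = False
--
--     for i in range(start_idx, len(lines)):
--         line = lines[i]
--
--         # Capturar @app.route
--         if line.strip().startswith('@app.route'):
--             function_lines.append(line)
--             continue
--
--         # Capturar outros decorators (@login_required, @permission_required)
--         if line.strip().startswith('@') and not in_function:
--             function_lines.append(line)
--             continue
--
--         # Início da função
--         if line.strip().startswith('def ') and not in_function: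
--             in_function = True
--             indent_level = len(line) - len(line.lstrip())
--             function_lines.append(line)
--             continue
--
--         # Dentro da função
--         if in_function:
--             current_indent = len(line) - len(line.lstrip())
--
--             # Fim da função (nova função ou decorator)
--             if line.strip() and current_indent <= indent_level:
--                 if line.strip().startswith(('def ', '@', 'class ')):
--                     break
--
--             function_lines.append(line)
--
--     return function_lines
-- ===== SOURCE B (Python) =====
-- def extract_route_function(lines, start_idx):
--     """Extrai função completa de uma rota"""
--     seq = [lines[i] for i in range(start_idx, len(lines))]
--     out = []
--     n = len(seq)
--     # decorators until the def header (stray lines are skipped)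
--     i = 0
--     while i < n:
--         s = seq[i].strip()
--         if s.startswith('def '):
--             break
--         if s.startswith('@'):
--             out.append(seq[i])
--         i += 1
--     if i == n:
--         return out
--     # the def header fixes the indentation level
--     header = seq[i]
--     out.append(header)
--     indent_level = len(header) - len(header.lstrip())
--     # body lines, until a dedented def / decorator / class starts a new block
--     for line in seq[i + 1:]:
--         s = line.strip()
--         if s and len(line) - len(line.lstrip()) <= indent_level and \
--                 s.startswith(('def ', '@', 'class ')):
--             break
--         out.append(line)
--     return out
-- ===== Notes on version B (the rewrite author's own statement) =====
-- stated objective: alternative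
-- what changed: Replaces A's single flat state machine (in_function/indent_level flags re-tested on every line) by an index-advancing multi-phase parser: materialize the scanned line sequence, collect decorators until the def header, fix the indent from the header, then scan the body until a dedented def/@/class line.
-- intended difference: When the first dedented block-starter after the function body is an '@app.route' line of the next route, A appends that line (and keeps collecting the next function) because its @app.route branch runs before the termination check, while B stops at the end of the function; stopping is the intended value since that decorator belongs to the next route. — e.g. on extract_route_function(["def f():", " x = 1", "@app.route('/y')", " y = 2"], 0): A returns ["def f():", " x = 1", "@app.route('/y')", " y = 2"], B returns ["def f():", " x = 1"]
import Mathlib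
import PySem

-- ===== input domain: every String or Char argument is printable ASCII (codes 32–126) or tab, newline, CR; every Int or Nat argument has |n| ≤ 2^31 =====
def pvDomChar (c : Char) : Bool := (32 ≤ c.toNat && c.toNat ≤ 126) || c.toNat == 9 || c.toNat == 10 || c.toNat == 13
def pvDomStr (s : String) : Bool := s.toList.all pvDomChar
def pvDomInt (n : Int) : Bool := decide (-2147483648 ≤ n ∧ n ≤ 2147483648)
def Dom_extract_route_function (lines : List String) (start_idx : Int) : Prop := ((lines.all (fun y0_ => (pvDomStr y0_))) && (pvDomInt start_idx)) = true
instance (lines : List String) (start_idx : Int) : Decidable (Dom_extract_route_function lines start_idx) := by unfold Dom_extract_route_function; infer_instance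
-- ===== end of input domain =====

set_option maxHeartbeats 400000

-- B restructures A's flat state machine into a phase parser (decorators / def header / body); return value only, no mutation.

-- ===== PORT A =====
-- len(line) - len(line.lstrip())
def pvIndent (line : String) : Int :=
  (PySem.Str.len line : Int) - (PySem.Str.len (PySem.Str.lstrip line) : Int)

-- line.strip().startswith(p), recomputed at each test exactly as the Python does
def pvSw (line p : String) : Bool := PySem.Str.startswith (PySem.Str.strip line) p

-- the tuple ('def ', '@', 'class ')
def pvStarters : List String := ["def ", "@", "class "]

-- A's for-loop over range(start_idx, len(lines)); state = (function_lines, indent_level, in_function); `break` returns acc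
def pvALoop (lines : List String) : List Int → List String → Option Int → Bool → List String
  | [], acc, _, _ => acc
  | i :: rest, acc, indent, inf =>
    match PySem.List.pyGet? lines i with
    | none => acc  -- IndexError: excluded by Pre_
    | some line =>
      if pvSw line "@app.route" then
        pvALoop lines rest (acc ++ [line]) indent inf
      else if pvSw line "@" && !inf then
        pvALoop lines rest (acc ++ [line]) indent inf
      else if pvSw line "def " && !inf then
        pvALoop lines rest (acc ++ [line]) (some (pvIndent line)) true
      else if inf then
        -- indent.getD 0: indent_level is always set when in_function holds
        if (!(PySem.Str.strip line == "")) && decide (pvIndent line ≤ indent.getD 0) then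
          if pvStarters.any (pvSw line) then acc
          else pvALoop lines rest (acc ++ [line]) indent inf
        else pvALoop lines rest (acc ++ [line]) indent inf
      else
        pvALoop lines rest acc indent inf

def extract_route_function (lines : List String) (start_idx : Int) : List String :=
  pvALoop lines (PySem.List.pyRange start_idx (lines.length : Int) 1) [] none false

-- ===== PORT B =====
-- seq = [lines[i] for i in range(start_idx, len(lines))]
def pvSeq (lines : List String) (idxs : List Int) : List String :=
  idxs.filterMap (fun i => PySem.List.pyGet? lines i)

-- body lines, until a dedented def / decorator / class starts a new block
def pvPhase3B (indent : Int) : List String → List String → List String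
  | [], out => out
  | line :: rest, out =>
    let s := PySem.Str.strip line
    if s ≠ "" ∧ pvIndent line ≤ indent ∧
       (PySem.Str.startswith s "def " = true ∨ PySem.Str.startswith s "@" = true ∨
        PySem.Str.startswith s "class " = true) then
      out
    else pvPhase3B indent rest (out ++ [line])

-- decorators until the def header (stray lines are skipped); the def branch is the header phase
def pvPhase1B : List String → List String → List String
  | [], out => out
  | line :: rest, out =>
    let s := PySem.Str.strip line
    if PySem.Str.startswith s "def " then pvPhase3B (pvIndent line) rest (out ++ [line])
    else if PySem.Str.startswith s "@" then pvPhase1B rest (out ++ [line])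
    else pvPhase1B rest out

def extract_route_function_alt (lines : List String) (start_idx : Int) : List String :=
  pvPhase1B (pvSeq lines (PySem.List.pyRange start_idx (lines.length : Int) 1)) []

-- ===== PRECONDITION & SPEC =====
-- Pre_ excludes only start_idx < -len(lines), where A (and B) raise IndexError on lines[start_idx].
def Pre_extract_route_function (lines : List String) (start_idx : Int) : Prop :=
  -(lines.length : Int) ≤ start_idx
instance (lines : List String) (start_idx : Int) : Decidable (Pre_extract_route_function lines start_idx) := by unfold Pre_extract_route_function; infer_instance

def pvWitness_extract_route_function : List String × Int :=
  (["@app.route('/x')", "@login_required", "def f():", "    pass", "def g():"], 0)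

-- the scanned line sequence, as a closed-form slice of the input: lines[start_idx:] with one
-- wrap-around block first when start_idx is negative (Python's negative indexing)
def pvSeqD (lines : List String) (start_idx : Int) : List String :=
  if 0 ≤ start_idx then lines.drop start_idx.toNat
  else lines.drop (start_idx + lines.length).toNat ++ lines

-- after the first def header, is the first dedented def/@/class line an '@app.route' line?
def pvDseq (seq : List String) : Bool :=
  match seq.dropWhile (fun l => !pvSw l "def ") with
  | [] => false
  | hdr :: body =>
    ((body.find? (fun l => decide (pvIndent l ≤ pvIndent hdr) && pvStarters.any (pvSw l))).any
      (fun l => pvSw l "@app.route"))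

-- When the first dedented block-starter after the function body is an '@app.route' line of the next
-- route, A appends it (its @app.route branch runs before the termination check) and keeps collecting,
-- while B stops at the end of the function; stopping is intended, the decorator belongs to the next route.
def D_extract_route_function (lines : List String) (start_idx : Int) : Prop :=
  pvDseq (pvSeqD lines start_idx) = true
instance (lines : List String) (start_idx : Int) : Decidable (D_extract_route_function lines start_idx) := by unfold D_extract_route_function; infer_instance

def Spec_extract_route_function (lines : List String) (start_idx : Int) (out : List String) : Prop := ¬ D_extract_route_function lines start_idx → out = extract_route_function_alt lines start_idx
instance (lines : List String) (start_idx : Int) (out : List String) : Decidable (Spec_extract_route_function lines start_idx out) := by unfold Spec_extract_route_function; infer_instance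

def pvDiffWitness_extract_route_function : List String × Int :=
  (["def f():", "    x = 1", "@app.route('/y')", "    y = 2"], 0)
def pvDiffWitnessOut_extract_route_function : (List String) × (List String) :=
  (["def f():", "    x = 1", "@app.route('/y')", "    y = 2"], ["def f():", "    x = 1"])

-- ===== CLAIM (what is proved, stated in full; the proofs are below) =====
def Claim_unchanged_extract_route_function : Prop := ∀ (lines : List String) (start_idx : Int), Dom_extract_route_function lines start_idx → Pre_extract_route_function lines start_idx → Spec_extract_route_function lines start_idx (extract_route_function lines start_idx)
def Claim_changed_extract_route_function : Prop := Dom_extract_route_function (pvDiffWitness_extract_route_function.1) (pvDiffWitness_extract_route_function.2) ∧ Pre_extract_route_function (pvDiffWitness_extract_route_function.1) (pvDiffWitness_extract_route_function.2) ∧ D_extract_route_function (pvDiffWitness_extract_route_function.1) (pvDiffWitness_extract_route_function.2) ∧ extract_route_function (pvDiffWitness_extract_route_function.1) (pvDiffWitness_extract_route_function.2) = pvDiffWitnessOut_extract_route_function.1 ∧ extract_route_function_alt (pvDiffWitness_extract_route_function.1) (pvDiffWitness_extract_route_function.2) = pvDiffWitnessOut_extract_route_function.2 ∧ pvDiffWitnessOut_extract_route_function.1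 ≠ pvDiffWitnessOut_extract_route_function.2
def Claim_exact_extract_route_function : Prop := ∀ (lines : List String) (start_idx : Int), Dom_extract_route_function lines start_idx → Pre_extract_route_function lines start_idx → D_extract_route_function lines start_idx → extract_route_function lines start_idx ≠ extract_route_function_alt lines start_idx

-- ===== LEMMAS AND PROOFS =====

-- startswith '@app.route' implies startswith '@'
theorem pv_sw_at_of_route (s : String) :
    PySem.Str.startswith s "@app.route" = true → PySem.Str.startswith s "@" = true := by
  simp only [PySem.Str.startswith, PySem.Chars.startswith]
  have h1 : "@app.route".toList = ['@','a','p','p','.','r','o','u','t','e'] := rfl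
  have h2 : "@".toList = ['@'] := rfl
  rw [h1, h2]
  cases s.toList with
  | nil => simp [List.isPrefixOf]
  | cons c t => simp [List.isPrefixOf]; intro hc _; exact hc

-- a line starting with '@' does not start with 'def '
theorem pv_sw_def_of_at (s : String) :
    PySem.Str.startswith s "@" = true → PySem.Str.startswith s "def " = false := by
  simp only [PySem.Str.startswith, PySem.Chars.startswith]
  have h1 : "def ".toList = ['d','e','f',' '] := rfl
  have h2 : "@".toList = ['@'] := rfl
  rw [h1, h2]
  cases s.toList with
  | nil => simp [List.isPrefixOf]
  | cons c t =>
    simp only [List.isPrefixOf, Bool.and_eq_true, beq_iff_eq]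
    rintro ⟨hc, -⟩
    subst hc
    simp

-- a string with a nonempty prefix is nonempty
theorem pv_sw_ne_empty (s p : String) (hp : p.toList ≠ [])
    (h : PySem.Str.startswith s p = true) : s ≠ "" := by
  intro hs; subst hs
  have h' : p.toList <+: ("" : String).toList := by
    have h2 : PySem.Chars.startswith ("" : String).toList p.toList = true := h
    exact (PySem.Chars.startswith_iff _ _).mp h2
  rw [show ("" : String).toList = [] from rfl] at h'
  exact hp (List.prefix_nil.mp h')

theorem pv_disj_ne (line : String)
    (h : PySem.Str.startswith (PySem.Str.strip line) "def " = true ∨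
         PySem.Str.startswith (PySem.Str.strip line) "@" = true ∨
         PySem.Str.startswith (PySem.Str.strip line) "class " = true) :
    PySem.Str.strip line ≠ "" := by
  rcases h with h | h | h
  · exact pv_sw_ne_empty _ "def " (by decide) h
  · exact pv_sw_ne_empty _ "@" (by decide) h
  · exact pv_sw_ne_empty _ "class " (by decide) h

-- the Bool tests of the ports and of D_, as one Prop
theorem pv_pred_iff (ind : Int) (line : String) :
    (decide (pvIndent line ≤ ind) && pvStarters.any (pvSw line)) = true ↔
      (pvIndent line ≤ ind ∧
        (PySem.Str.startswith (PySem.Str.strip line) "def " = true ∨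
         PySem.Str.startswith (PySem.Str.strip line) "@" = true ∨
         PySem.Str.startswith (PySem.Str.strip line) "class " = true)) := by
  simp [pvStarters, pvSw, or_assoc]

theorem pv_any_iff (line : String) :
    pvStarters.any (pvSw line) = true ↔
      (PySem.Str.startswith (PySem.Str.strip line) "def " = true ∨
       PySem.Str.startswith (PySem.Str.strip line) "@" = true ∨
       PySem.Str.startswith (PySem.Str.strip line) "class " = true) := by
  simp [pvStarters, pvSw, or_assoc]

theorem pv_outer_iff (ind : Int) (line : String) :
    ((!(PySem.Str.strip line == "")) && decide (pvIndent line ≤ ind)) = true ↔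
      (PySem.Str.strip line ≠ "" ∧ pvIndent line ≤ ind) := by
  simp

-- B's break condition holds exactly when D_'s find? predicate does
theorem pv_Bcond_iff (ind : Int) (line : String) :
    (PySem.Str.strip line ≠ "" ∧ pvIndent line ≤ ind ∧
      (PySem.Str.startswith (PySem.Str.strip line) "def " = true ∨
       PySem.Str.startswith (PySem.Str.strip line) "@" = true ∨
       PySem.Str.startswith (PySem.Str.strip line) "class " = true)) ↔
    (pvIndent line ≤ ind ∧
      (PySem.Str.startswith (PySem.Str.strip line) "def " = true ∨
       PySem.Str.startswith (PySem.Str.strip line) "@" = true ∨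
       PySem.Str.startswith (PySem.Str.strip line) "class " = true)) := by
  constructor
  · rintro ⟨-, h2, h3⟩
    exact ⟨h2, h3⟩
  · rintro ⟨h2, h3⟩
    exact ⟨pv_disj_ne line h3, h2, h3⟩

-- proof-side twin of the body scan of pvDseq
def pvD3 (lvl : Int) (body : List String) : Bool :=
  ((body.find? (fun l => decide (pvIndent l ≤ lvl) && pvStarters.any (pvSw l))).any
    (fun l => pvSw l "@app.route"))

theorem pvDseq_cons_not_def (line : String) (seq' : List String)
    (hnd : pvSw line "def " = false) :
    pvDseq (line :: seq') = pvDseq seq' := by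
  simp [pvDseq, List.dropWhile_cons, hnd]

theorem pvDseq_cons_def (line : String) (seq' : List String)
    (hd : pvSw line "def " = true) :
    pvDseq (line :: seq') = pvD3 (pvIndent line) seq' := by
  simp [pvDseq, pvD3, List.dropWhile_cons, hd]

-- A's loop once in_function agrees with phase 3 when no @app.route terminator comes first
theorem pv_A3 (lines : List String) (idxs : List Int)
    (h : ∀ i ∈ idxs, (PySem.List.pyGet? lines i).isSome = true) (acc : List String) (ind : Int)
    (hD : pvD3 ind (pvSeq lines idxs) = false) :
    pvALoop lines idxs acc (some ind) true = pvPhase3B ind (pvSeq lines idxs) acc := by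
  induction idxs generalizing acc with
  | nil => simp [pvALoop, pvSeq, pvPhase3B]
  | cons i rest ih =>
    obtain ⟨line, hline⟩ := Option.isSome_iff_exists.mp (h i (by simp))
    have hrest : ∀ j ∈ rest, (PySem.List.pyGet? lines j).isSome = true :=
      fun j hj => h j (by simp [hj])
    have hseq : pvSeq lines (i :: rest) = line :: pvSeq lines rest := by simp [pvSeq, hline]
    rw [hseq] at hD ⊢
    simp only [pvALoop, hline, pvPhase3B, Bool.not_true, Bool.and_false, Bool.false_eq_true,
      if_false, if_true]
    rw [Option.getD_some]
    by_cases hb : (decide (pvIndent line ≤ ind) && pvStarters.any (pvSw line)) = true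
    · obtain ⟨hle, hdisj⟩ := (pv_pred_iff ind line).mp hb
      have hne := pv_disj_ne line hdisj
      have hroute : pvSw line "@app.route" = false := by
        simpa [pvD3, List.find?_cons, hb] using hD
      conv_lhs => rw [if_neg (show ¬(pvSw line "@app.route" = true) by
                        rw [hroute]; exact Bool.false_ne_true),
                      if_pos ((pv_outer_iff ind line).mpr ⟨hne, hle⟩),
                      if_pos ((pv_any_iff line).mpr hdisj)]
      rw [if_pos ⟨hne, hle, hdisj⟩]
    · have hbf : (decide (pvIndent line ≤ ind) && pvStarters.any (pvSw line)) = false :=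
        Bool.eq_false_iff.mpr hb
      have hD' : pvD3 ind (pvSeq lines rest) = false := by
        simpa [pvD3, List.find?_cons, hbf] using hD
      have hnotB : ¬(PySem.Str.strip line ≠ "" ∧ pvIndent line ≤ ind ∧
          (PySem.Str.startswith (PySem.Str.strip line) "def " = true ∨
           PySem.Str.startswith (PySem.Str.strip line) "@" = true ∨
           PySem.Str.startswith (PySem.Str.strip line) "class " = true)) :=
        fun hc => hb ((pv_pred_iff ind line).mpr ((pv_Bcond_iff ind line).mp hc))
      rw [if_neg hnotB]
      by_cases hr : pvSw line "@app.route" = true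
      · conv_lhs => rw [if_pos hr]
        exact ih hrest _ hD'
      · conv_lhs => rw [if_neg hr]
        by_cases ho : ((!(PySem.Str.strip line == "")) && decide (pvIndent line ≤ ind)) = true
        · have ha : ¬(pvStarters.any (pvSw line) = true) := by
            intro hx
            exact hb ((pv_pred_iff ind line).mpr
              ⟨((pv_outer_iff ind line).mp ho).2, (pv_any_iff line).mp hx⟩)
          conv_lhs => rw [if_pos ho, if_neg ha]
          exact ih hrest _ hD'
        · conv_lhs => rw [if_neg ho]
          exact ih hrest _ hD'

-- A's loop before the def agrees with phase 1
theorem pv_A1 (lines : List String) (idxs : List Int)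
    (h : ∀ i ∈ idxs, (PySem.List.pyGet? lines i).isSome = true) (acc : List String)
    (hD : pvDseq (pvSeq lines idxs) = false) :
    pvALoop lines idxs acc none false = pvPhase1B (pvSeq lines idxs) acc := by
  induction idxs generalizing acc with
  | nil => simp [pvALoop, pvSeq, pvPhase1B]
  | cons i rest ih =>
    obtain ⟨line, hline⟩ := Option.isSome_iff_exists.mp (h i (by simp))
    have hrest : ∀ j ∈ rest, (PySem.List.pyGet? lines j).isSome = true :=
      fun j hj => h j (by simp [hj])
    have hseq : pvSeq lines (i :: rest) = line :: pvSeq lines rest := by simp [pvSeq, hline]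
    rw [hseq] at hD ⊢
    simp only [pvALoop, hline, pvPhase1B, Bool.not_false, Bool.and_true, Bool.false_eq_true,
      if_false, if_true]
    by_cases cdef : pvSw line "def " = true
    · have cdefB : PySem.Str.startswith (PySem.Str.strip line) "def " = true := cdef
      have c2 : ¬(pvSw line "@" = true) := by
        intro hc
        have hf := pv_sw_def_of_at (PySem.Str.strip line) hc
        rw [hf] at cdefB
        exact Bool.false_ne_true cdefB
      have c1 : ¬(pvSw line "@app.route" = true) :=
        fun hc => c2 (pv_sw_at_of_route (PySem.Str.strip line) hc)
      conv_lhs => rw [if_neg c1, if_neg c2, if_pos cdef]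
      conv_rhs => rw [if_pos cdefB]
      have hD3 : pvD3 (pvIndent line) (pvSeq lines rest) = false := by
        rw [pvDseq_cons_def line _ cdef] at hD; exact hD
      exact pv_A3 lines rest hrest _ _ hD3
    · have hD' : pvDseq (pvSeq lines rest) = false := by
        rw [pvDseq_cons_not_def line _ (Bool.eq_false_iff.mpr cdef)] at hD; exact hD
      have cdefB : ¬(PySem.Str.startswith (PySem.Str.strip line) "def " = true) := cdef
      conv_rhs => rw [if_neg cdefB]
      by_cases c1 : pvSw line "@app.route" = true
      · have c2B : PySem.Str.startswith (PySem.Str.strip line) "@" = true :=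
          pv_sw_at_of_route (PySem.Str.strip line) c1
        conv_lhs => rw [if_pos c1]
        conv_rhs => rw [if_pos c2B]
        exact ih hrest _ hD'
      · by_cases c2 : pvSw line "@" = true
        · have c2B : PySem.Str.startswith (PySem.Str.strip line) "@" = true := c2
          conv_lhs => rw [if_neg c1, if_pos c2]
          conv_rhs => rw [if_pos c2B]
          exact ih hrest _ hD'
        · have c2B : ¬(PySem.Str.startswith (PySem.Str.strip line) "@" = true) := c2
          conv_lhs => rw [if_neg c1, if_neg c2, if_neg cdef]
          conv_rhs => rw [if_neg c2B]
          exact ih hrest _ hD'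

-- pvALoop never shortens its accumulator
theorem pvALoop_len_ge (lines : List String) (idxs : List Int) (acc : List String)
    (ind : Option Int) (inf : Bool) :
    acc.length ≤ (pvALoop lines idxs acc ind inf).length := by
  induction idxs generalizing acc ind inf with
  | nil => simp [pvALoop]
  | cons i rest ih =>
    simp only [pvALoop]
    cases PySem.List.pyGet? lines i with
    | none => simp
    | some line =>
      simp only
      split_ifs <;> first
        | rfl
        | exact le_trans (by simp) (ih _ _ _)
        | exact ih _ _ _

-- once in_function, if the first terminator line is an @app.route line, A collects strictly more than phase 3
theorem pv_A3_len (lines : List String) (idxs : List Int)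
    (h : ∀ i ∈ idxs, (PySem.List.pyGet? lines i).isSome = true) (acc : List String) (ind : Int)
    (hD : pvD3 ind (pvSeq lines idxs) = true) :
    (pvPhase3B ind (pvSeq lines idxs) acc).length < (pvALoop lines idxs acc (some ind) true).length := by
  induction idxs generalizing acc with
  | nil => simp [pvSeq, pvD3] at hD
  | cons i rest ih =>
    obtain ⟨line, hline⟩ := Option.isSome_iff_exists.mp (h i (by simp))
    have hrest : ∀ j ∈ rest, (PySem.List.pyGet? lines j).isSome = true :=
      fun j hj => h j (by simp [hj])
    have hseq : pvSeq lines (i :: rest) = line :: pvSeq lines rest := by simp [pvSeq, hline]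
    rw [hseq] at hD ⊢
    simp only [pvALoop, hline, pvPhase3B, Bool.not_true, Bool.and_false, Bool.false_eq_true,
      if_false, if_true]
    rw [Option.getD_some]
    by_cases hb : (decide (pvIndent line ≤ ind) && pvStarters.any (pvSw line)) = true
    · obtain ⟨hle, hdisj⟩ := (pv_pred_iff ind line).mp hb
      have hne := pv_disj_ne line hdisj
      have hroute : pvSw line "@app.route" = true := by
        simpa [pvD3, List.find?_cons, hb] using hD
      conv_rhs => rw [if_pos hroute]
      rw [if_pos ⟨hne, hle, hdisj⟩]
      exact lt_of_lt_of_le (show acc.length < (acc ++ [line]).length by simp)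
        (pvALoop_len_ge lines rest (acc ++ [line]) (some ind) true)
    · have hbf : (decide (pvIndent line ≤ ind) && pvStarters.any (pvSw line)) = false :=
        Bool.eq_false_iff.mpr hb
      have hD' : pvD3 ind (pvSeq lines rest) = true := by
        simpa [pvD3, List.find?_cons, hbf] using hD
      have hnotB : ¬(PySem.Str.strip line ≠ "" ∧ pvIndent line ≤ ind ∧
          (PySem.Str.startswith (PySem.Str.strip line) "def " = true ∨
           PySem.Str.startswith (PySem.Str.strip line) "@" = true ∨
           PySem.Str.startswith (PySem.Str.strip line) "class " = true)) :=
        fun hc => hb ((pv_pred_iff ind line).mpr ((pv_Bcond_iff ind line).mp hc))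
      rw [if_neg hnotB]
      by_cases hr : pvSw line "@app.route" = true
      · conv_rhs => rw [if_pos hr]
        exact ih hrest _ hD'
      · conv_rhs => rw [if_neg hr]
        by_cases ho : ((!(PySem.Str.strip line == "")) && decide (pvIndent line ≤ ind)) = true
        · have ha : ¬(pvStarters.any (pvSw line) = true) := by
            intro hx
            exact hb ((pv_pred_iff ind line).mpr
              ⟨((pv_outer_iff ind line).mp ho).2, (pv_any_iff line).mp hx⟩)
          conv_rhs => rw [if_pos ho, if_neg ha]
          exact ih hrest _ hD'
        · conv_rhs => rw [if_neg ho]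
          exact ih hrest _ hD'

theorem pv_A1_len (lines : List String) (idxs : List Int)
    (h : ∀ i ∈ idxs, (PySem.List.pyGet? lines i).isSome = true) (acc : List String)
    (hD : pvDseq (pvSeq lines idxs) = true) :
    (pvPhase1B (pvSeq lines idxs) acc).length < (pvALoop lines idxs acc none false).length := by
  induction idxs generalizing acc with
  | nil => simp [pvSeq, pvDseq] at hD
  | cons i rest ih =>
    obtain ⟨line, hline⟩ := Option.isSome_iff_exists.mp (h i (by simp))
    have hrest : ∀ j ∈ rest, (PySem.List.pyGet? lines j).isSome = true :=
      fun j hj => h j (by simp [hj])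
    have hseq : pvSeq lines (i :: rest) = line :: pvSeq lines rest := by simp [pvSeq, hline]
    rw [hseq] at hD ⊢
    simp only [pvALoop, hline, pvPhase1B, Bool.not_false, Bool.and_true, Bool.false_eq_true,
      if_false, if_true]
    by_cases cdef : pvSw line "def " = true
    · have cdefB : PySem.Str.startswith (PySem.Str.strip line) "def " = true := cdef
      have c2 : ¬(pvSw line "@" = true) := by
        intro hc
        have hf := pv_sw_def_of_at (PySem.Str.strip line) hc
        rw [hf] at cdefB
        exact Bool.false_ne_true cdefB
      have c1 : ¬(pvSw line "@app.route" = true) :=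
        fun hc => c2 (pv_sw_at_of_route (PySem.Str.strip line) hc)
      conv_rhs => rw [if_neg c1, if_neg c2, if_pos cdef]
      conv_lhs => rw [if_pos cdefB]
      have hD3 : pvD3 (pvIndent line) (pvSeq lines rest) = true := by
        rw [pvDseq_cons_def line _ cdef] at hD; exact hD
      exact pv_A3_len lines rest hrest _ _ hD3
    · have hD' : pvDseq (pvSeq lines rest) = true := by
        rw [pvDseq_cons_not_def line _ (Bool.eq_false_iff.mpr cdef)] at hD; exact hD
      have cdefB : ¬(PySem.Str.startswith (PySem.Str.strip line) "def " = true) := cdef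
      conv_lhs => rw [if_neg cdefB]
      by_cases c1 : pvSw line "@app.route" = true
      · have c2B : PySem.Str.startswith (PySem.Str.strip line) "@" = true :=
          pv_sw_at_of_route (PySem.Str.strip line) c1
        conv_rhs => rw [if_pos c1]
        conv_lhs => rw [if_pos c2B]
        exact ih hrest _ hD'
      · by_cases c2 : pvSw line "@" = true
        · have c2B : PySem.Str.startswith (PySem.Str.strip line) "@" = true := c2
          conv_rhs => rw [if_neg c1, if_pos c2]
          conv_lhs => rw [if_pos c2B]
          exact ih hrest _ hD'
        · have c2B : ¬(PySem.Str.startswith (PySem.Str.strip line) "@" = true) := c2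
          conv_rhs => rw [if_neg c1, if_neg c2, if_neg cdef]
          conv_lhs => rw [if_neg c2B]
          exact ih hrest _ hD'

theorem pvSeq_nonneg (xs : List String) (k : Nat) :
    (PySem.List.pyRange (k : Int) (xs.length : Int) 1).filterMap
      (fun i => PySem.List.pyGet? xs i) = xs.drop k := by
  rw [PySem.List.pyRange_one]
  rw [List.filterMap_map]
  have hstep : ∀ t ∈ List.range ((xs.length : Int) - k).toNat,
      ((fun i => PySem.List.pyGet? xs i) ∘ (fun t : Nat => (k : Int) + ↑t)) t = some (xs.getD (k + t) "") := by
    intro t ht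
    simp only [List.mem_range] at ht
    have h1 : (k : Int) + (t : Int) = ((k + t : Nat) : Int) := by push_cast; ring
    have h2 : k + t < xs.length := by omega
    simp only [Function.comp, h1, PySem.List.pyGet?_natCast]
    rw [List.getElem?_eq_getElem h2, List.getD_eq_getElem _ _ h2]
  rw [List.filterMap_congr hstep,
      show (fun x => some (xs.getD (k + x) "")) = (some ∘ fun x => xs.getD (k + x) "") from rfl,
      List.filterMap_eq_map]
  apply List.ext_getElem
  · simp
  · intro i h1 h2
    simp only [List.getElem_map, List.getElem_range, List.getElem_drop]
    exact List.getD_eq_getElem _ _ (by simp at h2; omega)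

theorem pvSeq_neg (xs : List String) (m : Nat) (h1 : 0 < m) (h2 : m ≤ xs.length) :
    (PySem.List.pyRange (-(m : Int)) 0 1).filterMap
      (fun i => PySem.List.pyGet? xs i) = xs.drop (xs.length - m) := by
  rw [PySem.List.pyRange_one]
  rw [List.filterMap_map]
  have hm : ((0 : Int) - -(m : Int)).toNat = m := by omega
  rw [hm]
  have hstep : ∀ t ∈ List.range m,
      ((fun i => PySem.List.pyGet? xs i) ∘ (fun t : Nat => -(m : Int) + ↑t)) t
        = some (xs.getD (xs.length - m + t) "") := by
    intro t ht
    simp only [List.mem_range] at ht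
    have h3 : -(m : Int) + (t : Int) = -((m - t : Nat) : Int) := by push_cast; omega
    have h4 : 0 < m - t := by omega
    have h5 : m - t ≤ xs.length := by omega
    simp only [Function.comp, h3]
    rw [PySem.List.pyGet?_neg_natCast _ _ h4 h5]
    have h6 : xs.length - (m - t) = xs.length - m + t := by omega
    have h7 : xs.length - m + t < xs.length := by omega
    rw [h6, List.getElem?_eq_getElem h7, List.getD_eq_getElem _ _ h7]
  rw [List.filterMap_congr hstep,
      show (fun x => some (xs.getD (xs.length - m + x) "")) = (some ∘ fun x => xs.getD (xs.length - m + x) "") from rfl,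
      List.filterMap_eq_map]
  apply List.ext_getElem
  · simp
    omega
  · intro i hh1 hh2
    simp only [List.getElem_map, List.getElem_range, List.getElem_drop]
    exact List.getD_eq_getElem _ _ (by simp at hh2; omega)

theorem pvSeqD_eq (lines : List String) (start_idx : Int)
    (hpre : Pre_extract_route_function lines start_idx) :
    pvSeqD lines start_idx = pvSeq lines (PySem.List.pyRange start_idx (lines.length : Int) 1) := by
  unfold pvSeqD pvSeq
  by_cases h0 : 0 ≤ start_idx
  · rw [if_pos h0]
    obtain ⟨k, rfl⟩ : ∃ k : Nat, start_idx = (k : Int) := ⟨start_idx.toNat, by omega⟩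
    simp only [Int.toNat_natCast]
    exact (pvSeq_nonneg lines k).symm
  · rw [if_neg h0]
    obtain ⟨m, hm⟩ : ∃ m : Nat, start_idx = -(m : Int) := ⟨(-start_idx).toNat, by omega⟩
    subst hm
    have hm1 : 0 < m := by omega
    have hm2 : m ≤ lines.length := by
      unfold Pre_extract_route_function at hpre; omega
    have hx : (-(m : Int) + (lines.length : Int)).toNat = lines.length - m := by omega
    rw [hx]
    rw [PySem.List.pyRange_one_append (-(m : Int)) 0 (lines.length : Int) (by omega) (by omega)]
    rw [List.filterMap_append, pvSeq_neg lines m hm1 hm2]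
    have h2 := pvSeq_nonneg lines 0
    simp only [Nat.cast_zero, List.drop_zero] at h2
    rw [h2]

theorem pv_idx_some (lines : List String) (start_idx : Int)
    (hpre : Pre_extract_route_function lines start_idx) :
    ∀ i ∈ PySem.List.pyRange start_idx (lines.length : Int) 1,
      (PySem.List.pyGet? lines i).isSome = true := by
  intro i hi
  rw [PySem.List.mem_pyRange_one] at hi
  rw [Option.isSome_iff_ne_none]
  intro hn
  rw [PySem.List.pyGet?_eq_none_iff] at hn
  exact hn ⟨by unfold Pre_extract_route_function at hpre; omega, by omega⟩

-- ===== VERDICT (by name: the statements are the Claim_ definitions above) =====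
theorem extract_route_function_spec : Claim_unchanged_extract_route_function := by
  intro lines start_idx _ hpre hD
  unfold extract_route_function extract_route_function_alt
  refine pv_A1 lines _ (pv_idx_some lines start_idx hpre) [] ?_
  unfold D_extract_route_function at hD
  rw [pvSeqD_eq lines start_idx hpre] at hD
  exact Bool.eq_false_iff.mpr hD

theorem extract_route_function_changed : Claim_changed_extract_route_function := by
  unfold Claim_changed_extract_route_function; decide

theorem extract_route_function_tight : Claim_exact_extract_route_function := by
  intro lines start_idx _ hpre hD heq
  unfold D_extract_route_function at hD
  rw [pvSeqD_eq lines start_idx hpre] at hD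
  have := pv_A1_len lines _ (pv_idx_some lines start_idx hpre) [] hD
  rw [show pvPhase1B (pvSeq lines (PySem.List.pyRange start_idx (lines.length : Int) 1)) [] =
        extract_route_function_alt lines start_idx from rfl,
      show pvALoop lines (PySem.List.pyRange start_idx (lines.length : Int) 1) [] none false =
        extract_route_function lines start_idx from rfl, heq] at this
  omega
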